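-- pv_equiv track=rewrite | github.com/PaddlePaddle/PaddleNLP | legacy/dialogue_system/dialogue_general_understanding/dgu/reader.py | _create_turns
-- ===== SOURCE A (Python) =====
-- def _create_turns(conv_example):
--     """create multi turn dataset"""
--     samples = []
--     max_turns = 20
--     for i in range(len(conv_example)):
--         conv_turns = conv_example[max(i - max_turns, 0):i + 1]
--         conv_info = "\1".join([sample[0] for sample in conv_turns])
--         samples.append((conv_info.split('\1'), conv_example[i][1]))
--     return samples
-- ===== SOURCE B (Python) =====
-- def _create_turns(conv_example):
--     """create multi turn dataset (incremental sliding window, one pass)"""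
--     samples = []
--     window = []  # the at most 21 most recent utterances, maintained incrementally
--     for utterance, label in conv_example:
--         window.append(utterance)
--         if len(window) > 21:
--             window.pop(0)
--         samples.append((list(window), label))
--     return samples
-- ===== Notes on version B (the rewrite author's own statement) =====
-- stated objective: alternative
-- what changed: Maintains the sliding window of at most 21 utterances incrementally in one pass (append + pop oldest), instead of re-slicing the list and re-joining/re-splitting the window strings with '\1' at every index.
import Mathlib
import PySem

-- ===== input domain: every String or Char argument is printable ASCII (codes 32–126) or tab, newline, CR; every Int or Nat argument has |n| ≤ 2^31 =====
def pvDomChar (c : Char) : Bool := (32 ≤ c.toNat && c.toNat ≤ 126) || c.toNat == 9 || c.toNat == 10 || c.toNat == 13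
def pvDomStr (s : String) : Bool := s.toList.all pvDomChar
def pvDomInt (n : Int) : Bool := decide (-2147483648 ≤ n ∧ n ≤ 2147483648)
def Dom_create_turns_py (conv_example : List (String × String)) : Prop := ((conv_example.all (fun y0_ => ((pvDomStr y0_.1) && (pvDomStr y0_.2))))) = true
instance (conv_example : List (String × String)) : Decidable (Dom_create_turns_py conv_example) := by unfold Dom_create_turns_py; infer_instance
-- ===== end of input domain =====

-- B maintains the sliding window of ≤21 utterances incrementally in one pass instead of
-- re-slicing and re-join/re-splitting the window text at every index (objective: alternative).


-- ===== PORT A =====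
def create_turns_py (conv_example : List (String × String)) : List (List String × String) :=
  (PySem.List.pyRange 0 (PySem.List.len conv_example) 1).foldl
    (fun samples i =>
      let conv_turns := PySem.List.slice conv_example (some (max (i - 20) 0)) (some (i + 1))
      let conv_info := PySem.Str.join "\x01" (conv_turns.map (fun sample => sample.1))
      -- conv_info.split('\1'): the separator is non-empty, so split? is always `some`
      -- conv_example[i]: i ranges over range(len(conv_example)), so it is always in range
      samples ++ [((PySem.Str.split? conv_info "\x01").getD [],
                   (PySem.List.pyGetD conv_example i ("", "")).2)])
    []

-- ===== PORT B =====
def create_turns_py_alt (conv_example : List (String × String)) : List (List String × String) :=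
  (conv_example.foldl
    (fun (st : List (List String × String) × List String) p =>
      let w := st.2 ++ [p.1]
      let w := if w.length > 21 then w.tail else w
      (st.1 ++ [(w, p.2)], w))
    ([], [])).1

-- ===== PRECONDITION & SPEC =====
def Spec_create_turns_py (conv_example : List (String × String)) (out : List (List String × String)) : Prop := out = create_turns_py_alt conv_example
instance (conv_example : List (String × String)) (out : List (List String × String)) : Decidable (Spec_create_turns_py conv_example out) := by unfold Spec_create_turns_py; infer_instance

-- ===== CLAIM (what is proved, stated in full; the proofs are below) =====
def Claim_equal_create_turns_py : Prop := ∀ (conv_example : List (String × String)), Dom_create_turns_py conv_example → Spec_create_turns_py conv_example (create_turns_py conv_example)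

-- ===== LEMMAS AND PROOFS =====

-- the last ≤21 elements of a list
def pvWin21 (l : List String) : List String := l.drop (l.length - 21)

-- common reference form: sample k = (last ≤21 utterances of the first k+1 turns, label of turn k)
def pvRef (conv : List (String × String)) : List (List String × String) :=
  (List.range conv.length).map (fun k =>
    (pvWin21 ((conv.take (k + 1)).map Prod.fst), (conv.getD k ("", "")).2))

-- PySem.Chars.splitOn.go characterised by Mathlib's List.splitOn (single-char separator)
lemma pv_go_eq_splitOn (c : Char) (l cur : List Char) (acc : List (List Char)) (fuel : Nat)
    (hf : l.length ≤ fuel) :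
    PySem.Chars.splitOn.go [c] fuel l cur acc
      = acc.reverse ++ (List.splitOn c l).modifyHead (cur.reverse ++ ·) := by
  induction l generalizing fuel cur acc with
  | nil =>
    cases fuel <;> simp [PySem.Chars.splitOn.go, List.splitOn]
  | cons a t ih =>
    cases fuel with
    | zero => simp at hf
    | succ f =>
      simp only [List.length_cons, Nat.add_le_add_iff_right] at hf
      rw [PySem.Chars.splitOn.go]
      by_cases hc : c = a
      · subst hc
        simp only [List.isPrefixOf, BEq.rfl, Bool.true_and, if_pos]
        have hd : List.drop [c].length (c :: t) = t := by simp
        rw [hd, ih _ _ _ hf]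
        simp only [List.splitOn, List.splitOnP_cons, BEq.rfl, if_pos]
        cases h : List.splitOnP (fun b => b == c) t <;>
          simp [List.modifyHead]
      · have : List.isPrefixOf [c] (a :: t) = false := by
          simp [List.isPrefixOf, hc]
        rw [this]
        simp only [Bool.false_eq_true, if_false]
        rw [ih _ _ _ hf]
        simp only [List.splitOn, List.splitOnP_cons, beq_iff_eq]
        rw [if_neg (by simpa using fun h => hc h.symm)]
        cases h : List.splitOnP (fun b => b == c) t <;>
          simp [List.modifyHead, List.reverse_cons, List.append_assoc]

lemma pv_splitOn_eq (c : Char) (l : List Char) :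
    PySem.Chars.splitOn l [c] = List.splitOn c l := by
  rw [PySem.Chars.splitOn, pv_go_eq_splitOn c l [] [] (l.length + 1) (by omega)]
  cases h : List.splitOn c l <;> simp [List.modifyHead]

-- join then split with a separator char occurring in no piece gives the pieces back
lemma pv_split_join (parts : List String) (hne : parts ≠ [])
    (h : ∀ p ∈ parts, '\x01' ∉ p.toList) :
    (PySem.Str.split? (PySem.Str.join "\x01" parts) "\x01").getD [] = parts := by
  rw [PySem.Str.split?, PySem.Str.join, PySem.Chars.split?]
  simp only [String.toList_ofList]
  have hsep : ("\x01" : String).toList = ['\x01'] := by decide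
  rw [hsep]
  simp only [List.isEmpty_cons, if_neg (by decide : ¬ (false = true))]
  rw [pv_splitOn_eq, PySem.Chars.join]
  rw [List.splitOn_intercalate _ _ (by simpa using h) (by simpa using hne)]
  simp [List.map_map, Function.comp_def, String.ofList_toList]

-- B's window update step maintains pvWin21
lemma pv_win_step (pref : List String) (u : String) :
    (if (pvWin21 pref ++ [u]).length > 21 then (pvWin21 pref ++ [u]).tail
     else pvWin21 pref ++ [u]) = pvWin21 (pref ++ [u]) := by
  unfold pvWin21
  simp only [List.length_append, List.length_drop, List.length_cons, List.length_nil]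
  by_cases hlen : pref.length ≥ 21
  · rw [if_pos (by omega)]
    have h1 : (pref.length - 21) + 1 = pref.length + 1 - 21 := by omega
    have h2 : pref.length + 1 - 21 ≤ pref.length := by omega
    rw [List.drop_append_of_le_length h2]
    have hne : pref.drop (pref.length - 21) ≠ [] := by
      intro hc
      have := congrArg List.length hc
      simp at this
      omega
    rw [List.tail_append_of_ne_nil hne, List.tail_drop, h1]
  · rw [if_neg (by omega)]
    have h0 : pref.length - 21 = 0 := by omega
    have h0' : pref.length + 1 - 21 = 0 := by omega
    simp [h0, h0']

-- loop invariant of B's single pass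
lemma pv_B_go (rest : List (String × String)) (acc : List (List String × String)) (pref : List String) :
    (rest.foldl (fun (st : List (List String × String) × List String) p =>
      let w := st.2 ++ [p.1]
      let w := if w.length > 21 then w.tail else w
      (st.1 ++ [(w, p.2)], w)) (acc, pvWin21 pref)).1
    = acc ++ (List.range rest.length).map (fun k =>
        (pvWin21 (pref ++ (rest.take (k+1)).map Prod.fst), (rest.getD k ("", "")).2)) := by
  induction rest generalizing acc pref with
  | nil => simp
  | cons p t ih =>
    simp only [List.foldl_cons]
    have hw := pv_win_step pref p.1
    simp only [hw]
    rw [ih (acc ++ [(pvWin21 (pref ++ [p.1]), p.2)]) (pref ++ [p.1])]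
    simp [List.range_succ_eq_map, Function.comp_def, List.append_assoc]

lemma pv_B_eq_ref (conv : List (String × String)) :
    create_turns_py_alt conv = pvRef conv := by
  unfold create_turns_py_alt pvRef
  have h0 : ([] : List String) = pvWin21 [] := rfl
  calc (conv.foldl (fun (st : List (List String × String) × List String) p =>
          let w := st.2 ++ [p.1]
          let w := if w.length > 21 then w.tail else w
          (st.1 ++ [(w, p.2)], w)) ([], [])).1
      = [] ++ (List.range conv.length).map (fun k =>
          (pvWin21 ([] ++ (conv.take (k+1)).map Prod.fst), (conv.getD k ("", "")).2)) := by
        rw [h0]; exact pv_B_go conv [] []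
    _ = _ := by simp

-- the window slice taken by A equals pvWin21 of the prefix
lemma pv_slice_eq_win (conv : List (String × String)) (k : Nat) (hk : k < conv.length) :
    ((conv.drop (k - 20)).take (k + 1 - (k - 20))).map Prod.fst
      = pvWin21 ((conv.take (k + 1)).map Prod.fst) := by
  unfold pvWin21
  rw [List.map_take, List.map_drop, List.map_take, List.length_take, List.length_map,
    List.drop_take]
  have h1 : min (k + 1) conv.length = k + 1 := by omega
  have h2 : k + 1 - 21 = k - 20 := by omega
  rw [h1, h2]

set_option maxHeartbeats 400000 in
lemma pv_A_eq_ref (conv : List (String × String)) (hd : Dom_create_turns_py conv) :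
    create_turns_py conv = pvRef conv := by
  unfold create_turns_py pvRef
  rw [PySem.List.len_eq, PySem.List.pyRange_zero_natCast, List.foldl_map,
    PySem.List.foldl_append_singleton_eq_map, List.nil_append]
  apply List.map_congr_left
  intro k hk
  rw [List.mem_range] at hk
  have hmax : max ((k : Int) - 20) 0 = ((k - 20 : Nat) : Int) := by omega
  have hone : ((k : Int) + 1) = ((k + 1 : Nat) : Int) := by push_cast; ring
  rw [hmax, hone, PySem.List.slice_natCast, PySem.List.pyGetD_natCast]
  have hwin := pv_slice_eq_win conv k hk
  rw [← hwin]
  refine Prod.ext ?_ rfl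
  apply pv_split_join
  · intro hc
    have := congrArg List.length hc
    simp only [List.length_map, List.length_take, List.length_drop, List.length_nil] at this
    omega
  · intro p hp
    simp only [List.mem_map] at hp
    obtain ⟨pair, hmem, hfst⟩ := hp
    have hconv : pair ∈ conv := List.mem_of_mem_drop (List.mem_of_mem_take hmem)
    rw [Dom_create_turns_py, List.all_eq_true] at hd
    have hpair := hd pair hconv
    simp only [Bool.and_eq_true, pvDomStr, List.all_eq_true] at hpair
    intro hin
    have hch := hpair.1 '\x01' (by rw [hfst]; exact hin)
    simp [pvDomChar] at hch

-- ===== VERDICT (by name: the statement is the Claim_ definition above) =====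
theorem create_turns_py_spec : Claim_equal_create_turns_py := by
  intro conv hd
  unfold Spec_create_turns_py
  rw [pv_A_eq_ref conv hd, pv_B_eq_ref]
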